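-- pv_equiv track=rewrite | github.com/MC-and-his-Agents/Syvert | syvert/platform_leakage.py | _resolve_boolean_alias
-- ===== SOURCE A (Python) =====
-- from collections.abc import Iterable, Mapping, Sequence
--
-- def _resolve_boolean_alias(
--     events: Sequence[tuple[tuple[int, int], bool, bool]],
--     position: tuple[int, int],
-- ) -> bool:
--     active_values: set[bool] = set()
--     for event_position, value, branch_local in events:
--         if event_position >= position:
--             break
--         if branch_local:
--             active_values.add(value)
--             continue
--         active_values = {value}
--     return True in active_values
-- ===== SOURCE B (Python) =====
-- def _resolve_boolean_alias(events, position):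
--     cutoff = len(events)
--     for i, (event_position, _value, _branch_local) in enumerate(events):
--         if event_position >= position:
--             cutoff = i
--             break
--     for _event_position, value, branch_local in reversed(events[:cutoff]):
--         if branch_local:
--             if value:
--                 return True
--         else:
--             return value
--     return False
-- ===== Notes on version B (the rewrite author's own statement) =====
-- stated objective: alternative
-- what changed: Instead of threading a set forward with a break, B finds the cutoff index and scans the prefix backwards, returning at the first True addition or at the last reset, needing no set.
import Mathlib
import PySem

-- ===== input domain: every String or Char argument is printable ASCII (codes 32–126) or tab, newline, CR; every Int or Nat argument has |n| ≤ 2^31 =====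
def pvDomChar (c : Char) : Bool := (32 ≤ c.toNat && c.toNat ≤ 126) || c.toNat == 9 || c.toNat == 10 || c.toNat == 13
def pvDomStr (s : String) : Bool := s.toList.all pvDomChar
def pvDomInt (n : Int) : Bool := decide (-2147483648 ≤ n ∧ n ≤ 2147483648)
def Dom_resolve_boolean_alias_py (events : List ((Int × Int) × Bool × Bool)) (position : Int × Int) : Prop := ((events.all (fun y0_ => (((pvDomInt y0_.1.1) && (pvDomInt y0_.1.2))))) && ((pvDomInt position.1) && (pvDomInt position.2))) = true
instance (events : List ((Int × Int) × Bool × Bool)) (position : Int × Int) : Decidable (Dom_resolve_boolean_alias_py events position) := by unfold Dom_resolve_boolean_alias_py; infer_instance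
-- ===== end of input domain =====

-- B replaces the forward set-accumulating loop by a cutoff index plus a backward scan of the prefix
-- that returns at the first True addition or at the last reset (no set kept): an alternative decomposition.


-- Python's `>=` on pairs of ints: lexicographic
def pvLexGE (a b : Int × Int) : Bool := (b.1 < a.1) || (a.1 == b.1 && b.2 ≤ a.2)

-- ===== PORT A =====
-- the for-loop of A with its break, threading the set `active_values`
def pvGoA (position : Int × Int) : List ((Int × Int) × Bool × Bool) → PySem.Set Bool → Bool
  | [], s => PySem.Set.contains s true
  | e :: rest, s =>
    if pvLexGE e.1 position then PySem.Set.contains s true            -- break: return True in active_values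
    else if e.2.2 then pvGoA position rest (PySem.Set.add s e.2.1)    -- branch_local: add
    else pvGoA position rest (PySem.Set.ofList [e.2.1])               -- reset: active_values = {value}

def resolve_boolean_alias_py (events : List ((Int × Int) × Bool × Bool)) (position : Int × Int) : Bool :=
  pvGoA position events PySem.Set.empty

-- ===== PORT B =====
-- B's first loop: index of the first event with event_position >= position (len(events) if none)
def pvCutoff (position : Int × Int) : List ((Int × Int) × Bool × Bool) → Nat
  | [] => 0
  | e :: rest => if pvLexGE e.1 position then 0 else pvCutoff position rest + 1

-- B's second loop: backward scan (given the reversed prefix)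
def pvGoB : List ((Int × Int) × Bool × Bool) → Bool
  | [] => false
  | e :: rest => if e.2.2 then (if e.2.1 then true else pvGoB rest) else e.2.1

-- events[:cutoff] = List.take, exact since 0 ≤ cutoff ≤ len(events); reversed → .reverse
def resolve_boolean_alias_py_alt (events : List ((Int × Int) × Bool × Bool)) (position : Int × Int) : Bool :=
  pvGoB ((events.take (pvCutoff position events)).reverse)

-- ===== PRECONDITION & SPEC =====
def Spec_resolve_boolean_alias_py (events : List ((Int × Int) × Bool × Bool)) (position : Int × Int) (out : Bool) : Prop := out = resolve_boolean_alias_py_alt events position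
instance (events : List ((Int × Int) × Bool × Bool)) (position : Int × Int) (out : Bool) : Decidable (Spec_resolve_boolean_alias_py events position out) := by unfold Spec_resolve_boolean_alias_py; infer_instance

-- ===== CLAIM (what is proved, stated in full; the proofs are below) =====
def Claim_equal_resolve_boolean_alias_py : Prop := ∀ (events : List ((Int × Int) × Bool × Bool)) (position : Int × Int), Dom_resolve_boolean_alias_py events position → Spec_resolve_boolean_alias_py events position (resolve_boolean_alias_py events position)

-- ===== LEMMAS AND PROOFS =====

-- one step of A's loop body on the set
def pvStep (s : PySem.Set Bool) (e : (Int × Int) × Bool × Bool) : PySem.Set Bool :=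
  if e.2.2 then PySem.Set.add s e.2.1 else PySem.Set.ofList [e.2.1]

lemma pvCutoff_take (position : Int × Int) (l : List ((Int × Int) × Bool × Bool)) :
    l.take (pvCutoff position l) = l.takeWhile (fun e => !pvLexGE e.1 position) := by
  induction l with
  | nil => rfl
  | cons e rest ih =>
    simp only [pvCutoff, List.takeWhile]
    by_cases h : pvLexGE e.1 position = true
    · simp [h]
    · simp [h, ih]

lemma pvGoA_eq_foldl (position : Int × Int) (l : List ((Int × Int) × Bool × Bool))
    (s : PySem.Set Bool) :
    pvGoA position l s =
      PySem.Set.contains ((l.takeWhile (fun e => !pvLexGE e.1 position)).foldl pvStep s) true := by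
  induction l generalizing s with
  | nil => rfl
  | cons e rest ih =>
    simp only [pvGoA, List.takeWhile]
    by_cases h : pvLexGE e.1 position = true
    · simp [h]
    · by_cases hb : e.2.2 = true <;> simp [h, hb, ih, pvStep]

lemma contains_add (s : PySem.Set Bool) (v b : Bool) :
    PySem.Set.contains (PySem.Set.add s v) b = (b == v || PySem.Set.contains s b) := by
  simp only [PySem.Set.add, PySem.Set.contains]
  by_cases h : s.contains v = true
  · by_cases hb : b = v <;> simp_all
  · by_cases hb : b = v <;> simp_all

lemma pvGoB_reverse (l : List ((Int × Int) × Bool × Bool)) :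
    pvGoB l.reverse = PySem.Set.contains (l.foldl pvStep PySem.Set.empty) true := by
  induction l using List.reverseRecOn with
  | nil => rfl
  | append_singleton l e ih =>
    rw [List.reverse_append, List.foldl_append]
    simp only [List.reverse_singleton, List.singleton_append, List.foldl_cons, List.foldl_nil, pvGoB]
    by_cases hb : e.2.2 = true
    · cases hv : e.2.1 <;> simp [pvStep, hb, hv, contains_add, ih]
    · cases hv : e.2.1 <;>
        simp [pvStep, hb, hv, PySem.Set.ofList, PySem.Set.contains, PySem.Set.add, PySem.Set.empty]

-- ===== VERDICT (by name: the statement is the Claim_ definition above) =====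
theorem resolve_boolean_alias_py_spec : Claim_equal_resolve_boolean_alias_py := by
  intro events position _
  unfold Spec_resolve_boolean_alias_py resolve_boolean_alias_py resolve_boolean_alias_py_alt
  rw [pvCutoff_take, pvGoA_eq_foldl, pvGoB_reverse]
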